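-- pv_equiv track=rewrite | github.com/Agent-Creeper06/Graph | Main.py | reverse_deps
-- ===== SOURCE A (Python) =====
-- from collections import deque
--
-- def reverse_graph(graph): #Граф обратных зависимостей
--     rev = {k: [] for k in graph} #Составление обратного графа
--     for a, deps in graph.items():
--         for b in deps:
--             rev.setdefault(b, []).append(a)
--     return rev
--
-- def reverse_deps(graph, target, max_depth, substr): #Постройка графа зависимостей
--     rev = reverse_graph(graph)
--     visited = set() #Массив для записи посещённых
--
--     q = deque() #Очередь для прохождения дерева в ширину
--     q.append((target, 0)) #Добавляем нулевой элемент
--     visited.add(target) #Добавляем этот элемент в посещённые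
--
--     depends = []
--
--     while q:
--         cur, depth = q.popleft()
--         if depth >= max_depth: #Проверка, что текущая глубина не превысила заданную
--             continue
--
--         for p in rev.get(cur, []):
--             if substr and substr in p: #Если пакет содержит подстроку, то он пропускается
--                 continue
--
--             if p not in visited: #Добавление посещённого пакета в список во избежании бесконечных циклов
--                 visited.add(p)
--                 depends.append(p)
--                 q.append((p, depth + 1))
--
--     return depends
-- ===== SOURCE B (Python) =====
-- def reverse_deps(graph, target, max_depth, substr):
--     if max_depth <= 0:
--         return []
--     seen = {target}
--     depends = []
--     # level 1: direct reverse-dependencies of target, found by scanning the edges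
--     for a, deps in graph.items():
--         for d in deps:
--             if d == target and not (substr and substr in a) and a not in seen:
--                 seen.add(a)
--                 depends.append(a)
--     # deeper levels: the output list itself is the queue; [start:end] is the current level
--     start = 0
--     for _ in range(1, max_depth):
--         end = len(depends)
--         if start == end:
--             break
--         for cur in depends[start:end]:
--             for a, deps in graph.items():
--                 for d in deps:
--                     if d == cur and not (substr and substr in a) and a not in seen:
--                         seen.add(a)
--                         depends.append(a)
--         start = end
--     return depends
-- ===== Notes on version B (the rewrite author's own statement) =====
-- stated objective: alternative
-- what changed: B drops both of A's data structures: it never builds the reverse-graph dict (predecessors are found by scanning the edge list directly per discovered node) and it has no BFS queue - the output list itself serves as the queue, with start/end indices marking the current level; skipping the dict construction makes it measurably faster when the set reachable from target is small, though per-node edge scans are O(V*E) in the worst case.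
import Mathlib
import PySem

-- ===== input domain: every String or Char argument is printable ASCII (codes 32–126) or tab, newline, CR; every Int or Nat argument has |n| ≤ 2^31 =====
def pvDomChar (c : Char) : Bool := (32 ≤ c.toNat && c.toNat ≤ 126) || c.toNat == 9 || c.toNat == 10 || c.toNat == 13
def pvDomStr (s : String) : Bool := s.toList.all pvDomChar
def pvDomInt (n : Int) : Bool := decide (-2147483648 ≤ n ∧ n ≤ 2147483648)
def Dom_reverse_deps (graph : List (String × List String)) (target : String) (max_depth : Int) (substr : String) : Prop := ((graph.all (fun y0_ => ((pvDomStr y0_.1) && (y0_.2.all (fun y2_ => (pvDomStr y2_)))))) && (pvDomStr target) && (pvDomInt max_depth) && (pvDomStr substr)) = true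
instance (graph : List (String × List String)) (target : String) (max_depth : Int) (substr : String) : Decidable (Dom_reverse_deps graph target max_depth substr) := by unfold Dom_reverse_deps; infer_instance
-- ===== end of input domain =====

-- B removes A's reverse-graph dict and BFS queue: predecessors are found by scanning the edge
-- list directly, and the output list itself serves as the queue via start/end level indices
-- (an "alternative" of similar size; return value only, no mutation).

-- ===== PORT A =====
-- reverse_graph: rev = {k: [] for k in graph}; then rev.setdefault(b, []).append(a) per edge
def pvRevGraphA (graph : List (String × List String)) : PySem.Dict String (List String) :=
  let rev := graph.foldl (fun d kv => d.insert kv.1 []) PySem.Dict.empty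
  graph.foldl (fun d kv => kv.2.foldl (fun d2 b => d2.modify b [] (fun l => l ++ [kv.1])) d) rev

-- body of A's `for p in rev.get(cur, [])` loop; state = (visited, depends, queue)
def pvAStep (substr : String) (depth : Int)
    (st : PySem.Set String × List String × List (String × Int)) (p : String) :
    PySem.Set String × List String × List (String × Int) :=
  if substr ≠ "" ∧ PySem.Str.isIn substr p = true then st
  else if st.1.contains p = true then st
  else (st.1.add p, st.2.1 ++ [p], st.2.2 ++ [(p, depth + 1)])

-- A's `while q:` loop; the fuel only makes the recursion total (it is provably never exhausted)
def pvALoop (rev : PySem.Dict String (List String)) (max_depth : Int) (substr : String) :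
    Nat → List (String × Int) → PySem.Set String → List String → List String
  | 0, _, _, dep => dep
  | _ + 1, [], _, dep => dep
  | f + 1, (cur, depth) :: q, vis, dep =>
    if max_depth ≤ depth then pvALoop rev max_depth substr f q vis dep
    else
      let st := (rev.getD cur []).foldl (pvAStep substr depth) (vis, dep, q)
      pvALoop rev max_depth substr f st.2.2 st.1 st.2.1

def reverse_deps (graph : List (String × List String)) (target : String) (max_depth : Int) (substr : String) : List String :=
  let rev := pvRevGraphA graph
  pvALoop rev max_depth substr (1 + 2 * (graph.flatMap (fun kv => kv.2)).length)
    [(target, 0)] (PySem.Set.add PySem.Set.empty target) []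

-- ===== PORT B =====
-- B's inner edge scan: for a, deps in graph: for d in deps: if d == cur and … ; state = (seen, depends)
def pvBScan (graph : List (String × List String)) (substr : String) (cur : String)
    (st : PySem.Set String × List String) : PySem.Set String × List String :=
  graph.foldl (fun st1 kv => kv.2.foldl (fun st2 d =>
    if d = cur ∧ ¬(substr ≠ "" ∧ PySem.Str.isIn substr kv.1 = true) ∧ ¬(st2.1.contains kv.1 = true)
    then (st2.1.add kv.1, st2.2 ++ [kv.1]) else st2) st1) st

-- B's `for _ in range(1, max_depth)` loop; depends[start:end] is the level being expanded
def pvBRounds (graph : List (String × List String)) (substr : String) :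
    Nat → Nat → PySem.Set String × List String → List String
  | 0, _, st => st.2
  | r + 1, start, st =>
    let e := st.2.length
    if start = e then st.2
    else pvBRounds graph substr r e
      ((st.2.drop start).foldl (fun s cur => pvBScan graph substr cur s) st)

def reverse_deps_alt (graph : List (String × List String)) (target : String) (max_depth : Int) (substr : String) : List String :=
  if max_depth ≤ 0 then []
  else
    let st0 := pvBScan graph substr target (PySem.Set.add PySem.Set.empty target, [])
    pvBRounds graph substr (max_depth - 1).toNat 0 st0

-- ===== PRECONDITION & SPEC =====
def Spec_reverse_deps (graph : List (String × List String)) (target : String) (max_depth : Int) (substr : String) (out : List String) : Prop := out = reverse_deps_alt graph target max_depth substr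
instance (graph : List (String × List String)) (target : String) (max_depth : Int) (substr : String) (out : List String) : Decidable (Spec_reverse_deps graph target max_depth substr out) := by unfold Spec_reverse_deps; infer_instance

-- ===== CLAIM (what is proved, stated in full; the proofs are below) =====
def Claim_equal_reverse_deps : Prop := ∀ (graph : List (String × List String)) (target : String) (max_depth : Int) (substr : String), Dom_reverse_deps graph target max_depth substr → Spec_reverse_deps graph target max_depth substr (reverse_deps graph target max_depth substr)

-- ===== LEMMAS AND PROOFS =====

-- all reversed edges (b, a), in the common traversal order
def pvEdges (graph : List (String × List String)) : List (String × String) :=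
  graph.flatMap (fun kv => kv.2.map (fun b => (b, kv.1)))

-- the reverse-adjacency list of cur, as a pure list
def pvAdj (graph : List (String × List String)) (cur : String) : List String :=
  ((pvEdges graph).filter (fun p => p.1 == cur)).map (·.2)

-- proof-side level-synchronous step and loop used to relate the two ports
def pvBStep (substr : String)
    (st : PySem.Set String × List String × List String) (p : String) :
    PySem.Set String × List String × List String :=
  if substr ≠ "" ∧ PySem.Str.isIn substr p = true then st
  else if st.1.contains p = true then st
  else (st.1.add p, st.2.1 ++ [p], st.2.2 ++ [p])

def pvBStep2 (substr : String)
    (st : PySem.Set String × List String) (p : String) :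
    PySem.Set String × List String :=
  if substr ≠ "" ∧ PySem.Str.isIn substr p = true then st
  else if st.1.contains p = true then st
  else (st.1.add p, st.2 ++ [p])

def pvBLoop (rev : PySem.Dict String (List String)) (substr : String) :
    Nat → List String → PySem.Set String → List String → List String
  | 0, _, _, dep => dep
  | r + 1, frontier, vis, dep =>
    if frontier.isEmpty then dep
    else
      let st := frontier.foldl (fun st cur => (rev.getD cur []).foldl (pvBStep substr) st)
        (vis, dep, ([] : List String))
      pvBLoop rev substr r st.2.2 st.1 st.2.1

-- measure: nodes of U not yet visited
def pvK (U : List String) (vis : PySem.Set String) : Nat :=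
  (U.filter (fun x => !(vis.contains x))).length

-- the nested edge fold is the flat fold over pvEdges
theorem pvRev_flat (graph : List (String × List String)) (d0 : PySem.Dict String (List String)) :
    graph.foldl (fun d kv => kv.2.foldl (fun d2 b => d2.modify b [] (fun l => l ++ [kv.1])) d) d0
    = (pvEdges graph).foldl (fun d p => d.modify p.1 [] (fun l => l ++ [p.2])) d0 := by
  induction graph generalizing d0 with
  | nil => rfl
  | cons kv g ih =>
    simp only [List.foldl_cons, pvEdges, List.flatMap_cons, List.foldl_append, List.foldl_map]
    exact ih _

theorem pvRevInit_aux (graph : List (String × List String)) :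
    ∀ (d0 : PySem.Dict String (List String)), (∀ c, d0.getD c ([] : List String) = []) →
    ∀ c, (graph.foldl (fun d kv => d.insert kv.1 []) d0).getD c ([] : List String) = [] := by
  induction graph with
  | nil => intro d0 h c; exact h c
  | cons kv g ih =>
    intro d0 h c
    refine ih _ (fun c' => ?_) c
    rw [PySem.Dict.getD_insert]
    split
    · rfl
    · exact h c'

theorem pvRevInit_getD (graph : List (String × List String)) (c : String) :
    (graph.foldl (fun d kv => d.insert kv.1 []) PySem.Dict.empty).getD c ([] : List String) = [] :=
  pvRevInit_aux graph PySem.Dict.empty (fun c' => by simp [PySem.Dict.getD_empty]) c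

theorem pvRevA_getD (graph : List (String × List String)) (c : String) :
    (pvRevGraphA graph).getD c ([] : List String) = pvAdj graph c := by
  unfold pvRevGraphA pvAdj
  rw [pvRev_flat, PySem.Dict.getD_foldl_modify_append, pvRevInit_getD]
  simp

-- A's inner fold is the level fold with the queue tail kept in front and depth tags added
theorem pvFoldAB (substr : String) (d : Int) (L : List String)
    (vis : PySem.Set String) (dep : List String) (q : List (String × Int)) (out : List String) :
    L.foldl (pvAStep substr d) (vis, dep, q ++ out.map (fun s => (s, d + 1)))
    = ((L.foldl (pvBStep substr) (vis, dep, out)).1,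
       (L.foldl (pvBStep substr) (vis, dep, out)).2.1,
       q ++ (L.foldl (pvBStep substr) (vis, dep, out)).2.2.map (fun s => (s, d + 1))) := by
  induction L generalizing vis dep out with
  | nil => rfl
  | cons p L ih =>
    simp only [List.foldl_cons]
    by_cases h1 : substr ≠ "" ∧ PySem.Str.isIn substr p = true
    · simp only [pvAStep, pvBStep, if_pos h1]
      exact ih vis dep out
    · by_cases h2 : PySem.Set.contains vis p = true
      · simp only [pvAStep, pvBStep, if_neg h1, if_pos h2]
        exact ih vis dep out
      · simp only [pvAStep, pvBStep, if_neg h1, if_neg h2]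
        have hq : (q ++ out.map (fun s => (s, d + 1))) ++ [(p, d + 1)]
            = q ++ (out ++ [p]).map (fun s => (s, d + 1)) := by
          simp [List.map_append]
        rw [hq]
        exact ih (vis.add p) (dep ++ [p]) (out ++ [p])

theorem pvFilter_ne_lt (p : String) : ∀ (l : List String), p ∈ l →
    (l.filter (fun x => !(x == p))).length < l.length := by
  intro l hl
  induction l with
  | nil => cases hl
  | cons a l ih =>
    by_cases ha : a = p
    · subst ha
      simp only [List.filter_cons, beq_self_eq_true, Bool.not_true, List.length_cons]
      exact Nat.lt_succ_of_le (List.length_filter_le _ _)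
    · rcases List.mem_cons.1 hl with h | h
      · exact absurd h.symm ha
      · have hb : (a == p) = false := beq_false_of_ne ha
        simp only [List.filter_cons, hb, Bool.not_false, if_true, List.length_cons]
        simpa using Nat.succ_lt_succ (ih h)

theorem pvK_add (U : List String) (vis : PySem.Set String) (p : String)
    (hU : p ∈ U) (hv : vis.contains p = false) :
    pvK U (vis.add p) + 1 ≤ pvK U vis := by
  have hc : ∀ x : String, (PySem.Set.contains (vis.add p) x) = (vis.contains x || x == p) := by
    intro x
    rw [Bool.eq_iff_iff]
    simp only [Bool.or_eq_true, beq_iff_eq, PySem.Set.contains_iff, PySem.Set.mem_add]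
  unfold pvK
  have hfil : U.filter (fun x => !((vis.add p).contains x))
      = (U.filter (fun x => !(vis.contains x))).filter (fun x => !(x == p)) := by
    rw [List.filter_filter]
    apply List.filter_congr
    intro x _
    rw [hc, Bool.not_or, Bool.and_comm]
  rw [hfil]
  have hpmem : p ∈ U.filter (fun x => !(vis.contains x)) := by
    refine List.mem_filter.2 ⟨hU, ?_⟩
    simp only [Bool.not_eq_eq_eq_not, Bool.not_true]
    exact hv
  exact pvFilter_ne_lt p _ hpmem

-- the level fold shrinks the unvisited-measure by at least as much as it grows the frontier
theorem pvFoldB_measure (substr : String) (U : List String) : ∀ (L : List String),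
    (∀ p ∈ L, p ∈ U) →
    ∀ (vis : PySem.Set String) (dep : List String) (out : List String),
    (L.foldl (pvBStep substr) (vis, dep, out)).2.2.length
      + 2 * pvK U (L.foldl (pvBStep substr) (vis, dep, out)).1
    ≤ out.length + 2 * pvK U vis := by
  intro L
  induction L with
  | nil => intro _ vis dep out; exact Nat.le_refl _
  | cons p L ih =>
    intro hL vis dep out
    have hp : p ∈ U := hL p (List.mem_cons_self)
    have hL' : ∀ x ∈ L, x ∈ U := fun x hx => hL x (List.mem_cons_of_mem _ hx)
    simp only [List.foldl_cons]
    by_cases h1 : substr ≠ "" ∧ PySem.Str.isIn substr p = true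
    · simp only [pvBStep, if_pos h1]
      exact ih hL' vis dep out
    · by_cases h2 : PySem.Set.contains vis p = true
      · simp only [pvBStep, if_neg h1, if_pos h2]
        exact ih hL' vis dep out
      · simp only [pvBStep, if_neg h1, if_neg h2]
        have hv : vis.contains p = false := by
          cases h : vis.contains p
          · rfl
          · exact absurd h h2
        have hk := pvK_add U vis p hp hv
        have := ih hL' (vis.add p) (dep ++ [p]) (out ++ [p])
        simp only [List.length_append, List.length_cons, List.length_nil] at this ⊢
        omega

theorem pvALoop_nil (rev : PySem.Dict String (List String)) (md : Int) (substr : String)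
    (f : Nat) (vis : PySem.Set String) (dep : List String) :
    pvALoop rev md substr f [] vis dep = dep := by
  cases f <;> rfl

-- once every queued depth has reached max_depth the A loop just drains
theorem pvALoop_drain (rev : PySem.Dict String (List String)) (md : Int) (substr : String)
    (d' : Int) (hd : md ≤ d') :
    ∀ (l : List String) (f : Nat), l.length ≤ f →
    ∀ (vis : PySem.Set String) (dep : List String),
    pvALoop rev md substr f (l.map (fun s => (s, d'))) vis dep = dep := by
  intro l
  induction l with
  | nil => intro f _ vis dep; exact pvALoop_nil rev md substr f vis dep
  | cons s l ih =>
    intro f hf vis dep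
    cases f with
    | zero => simp at hf
    | succ f0 =>
      simp only [List.map_cons, pvALoop, if_pos hd]
      exact ih f0 (by simp at hf; omega) vis dep

-- A mid-level (frontier rest fr at depth d, next level already-found nodes nx)
-- equals the level loop finishing the current round and continuing
theorem pvMain (rev : PySem.Dict String (List String)) (md : Int) (substr : String)
    (U : List String) (hU : ∀ c, ∀ p ∈ rev.getD c ([] : List String), p ∈ U) :
    ∀ (r : Nat) (fr : List String) (f : Nat) (nx : List String)
      (vis : PySem.Set String) (dep : List String) (d : Int),
      d < md → (md - d - 1).toNat = r →
      fr.length + nx.length + 2 * pvK U vis ≤ f →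
      pvALoop rev md substr f
        (fr.map (fun s => (s, d)) ++ nx.map (fun s => (s, d + 1))) vis dep
      = (pvBLoop rev substr r
          (fr.foldl (fun st cur => (rev.getD cur []).foldl (pvBStep substr) st) (vis, dep, nx)).2.2
          (fr.foldl (fun st cur => (rev.getD cur []).foldl (pvBStep substr) st) (vis, dep, nx)).1
          (fr.foldl (fun st cur => (rev.getD cur []).foldl (pvBStep substr) st) (vis, dep, nx)).2.1) := by
  intro r
  induction r with
  | zero =>
    intro fr
    induction fr with
    | nil =>
      intro f nx vis dep d hd hr hf
      simp only [List.map_nil, List.nil_append, List.foldl_nil]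
      have hd1 : md ≤ d + 1 := by omega
      rw [pvALoop_drain rev md substr (d + 1) hd1 nx f (by omega) vis dep]
      rfl
    | cons p fr' ihf =>
      intro f nx vis dep d hd hr hf
      cases f with
      | zero => exfalso; simp [List.length_cons] at hf
      | succ f0 =>
        simp only [List.map_cons, List.cons_append, pvALoop, if_neg (not_le.mpr hd)]
        rw [pvFoldAB]
        have hmeas := pvFoldB_measure substr U (rev.getD p []) (hU p) vis dep nx
        have hf' : fr'.length
            + (List.foldl (pvBStep substr) (vis, dep, nx) (rev.getD p [])).2.2.length
            + 2 * pvK U (List.foldl (pvBStep substr) (vis, dep, nx) (rev.getD p [])).1 ≤ f0 := by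
          simp only [List.length_cons] at hf; omega
        have hind := ihf f0 (List.foldl (pvBStep substr) (vis, dep, nx) (rev.getD p [])).2.2
          (List.foldl (pvBStep substr) (vis, dep, nx) (rev.getD p [])).1
          (List.foldl (pvBStep substr) (vis, dep, nx) (rev.getD p [])).2.1 d hd hr hf'
        simp only [List.foldl_cons]
        exact hind
  | succ r ihr =>
    intro fr
    induction fr with
    | nil =>
      intro f nx vis dep d hd hr hf
      simp only [List.map_nil, List.nil_append, List.foldl_nil]
      cases nx with
      | nil =>
        simp only [List.map_nil, pvALoop_nil]
        rfl
      | cons x nx' =>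
        have := ihr (x :: nx') f [] vis dep (d + 1) (by omega) (by omega) (by simpa using hf)
        simp only [List.map_nil, List.append_nil] at this
        rw [this]
        conv_rhs => rw [pvBLoop]
        simp
    | cons p fr' ihf =>
      intro f nx vis dep d hd hr hf
      cases f with
      | zero => exfalso; simp [List.length_cons] at hf
      | succ f0 =>
        simp only [List.map_cons, List.cons_append, pvALoop, if_neg (not_le.mpr hd)]
        rw [pvFoldAB]
        have hmeas := pvFoldB_measure substr U (rev.getD p []) (hU p) vis dep nx
        have hf' : fr'.length
            + (List.foldl (pvBStep substr) (vis, dep, nx) (rev.getD p [])).2.2.length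
            + 2 * pvK U (List.foldl (pvBStep substr) (vis, dep, nx) (rev.getD p [])).1 ≤ f0 := by
          simp only [List.length_cons] at hf; omega
        have hind := ihf f0 (List.foldl (pvBStep substr) (vis, dep, nx) (rev.getD p [])).2.2
          (List.foldl (pvBStep substr) (vis, dep, nx) (rev.getD p [])).1
          (List.foldl (pvBStep substr) (vis, dep, nx) (rev.getD p [])).2.1 d hd hr hf'
        simp only [List.foldl_cons]
        exact hind

-- ---- relating B's port to the level loop ----

-- B's inner scan is the pvBStep2 fold over the reverse-adjacency list of cur
theorem pvBScan_eq (graph : List (String × List String)) (substr cur : String)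
    (st : PySem.Set String × List String) :
    pvBScan graph substr cur st = (pvAdj graph cur).foldl (pvBStep2 substr) st := by
  have hflat : ∀ (st0 : PySem.Set String × List String),
      pvBScan graph substr cur st0
      = (pvEdges graph).foldl (fun st2 e =>
          if e.1 = cur ∧ ¬(substr ≠ "" ∧ PySem.Str.isIn substr e.2 = true) ∧ ¬(st2.1.contains e.2 = true)
          then (st2.1.add e.2, st2.2 ++ [e.2]) else st2) st0 := by
    unfold pvBScan
    induction graph with
    | nil => intro st0; rfl
    | cons kv g ih =>
      intro st0
      simp only [List.foldl_cons, pvEdges, List.flatMap_cons, List.foldl_append, List.foldl_map]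
      exact ih _
  rw [hflat st]
  unfold pvAdj
  generalize pvEdges graph = E
  induction E generalizing st with
  | nil => rfl
  | cons e E ih =>
    simp only [List.foldl_cons, List.filter_cons]
    by_cases hc : e.1 = cur
    · have hb : (e.1 == cur) = true := by simp [hc]
      simp only [hb, if_true, List.map_cons, List.foldl_cons]
      by_cases h1 : substr ≠ "" ∧ PySem.Str.isIn substr e.2 = true
      · have : ¬(e.1 = cur ∧ ¬(substr ≠ "" ∧ PySem.Str.isIn substr e.2 = true) ∧ ¬(st.1.contains e.2 = true)) := by
          tauto
        rw [if_neg this, pvBStep2, if_pos h1]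
        exact ih st
      · by_cases h2 : st.1.contains e.2 = true
        · have : ¬(e.1 = cur ∧ ¬(substr ≠ "" ∧ PySem.Str.isIn substr e.2 = true) ∧ ¬(st.1.contains e.2 = true)) := by
            tauto
          rw [if_neg this, pvBStep2, if_neg h1, if_pos h2]
          exact ih st
        · rw [if_pos ⟨hc, h1, h2⟩]
          have hstep : pvBStep2 substr st e.2 = (st.1.add e.2, st.2 ++ [e.2]) := by
            rw [pvBStep2, if_neg h1, if_neg h2]
          rw [hstep]
          exact ih _
    · have hb : (e.1 == cur) = false := by simp [hc]
      have : ¬(e.1 = cur ∧ ¬(substr ≠ "" ∧ PySem.Str.isIn substr e.2 = true) ∧ ¬(st.1.contains e.2 = true)) := by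
        tauto
      simp only [hb, if_neg this, Bool.false_eq_true, if_false]
      exact ih st

-- pvBStep2 is the (visited, depends) projection of pvBStep, for any out
theorem pvBStep2_proj (substr : String) : ∀ (L : List String)
    (vis : PySem.Set String) (dep out : List String),
    L.foldl (pvBStep2 substr) (vis, dep)
    = ((L.foldl (pvBStep substr) (vis, dep, out)).1,
       (L.foldl (pvBStep substr) (vis, dep, out)).2.1) := by
  intro L
  induction L with
  | nil => intro vis dep out; rfl
  | cons p L ih =>
    intro vis dep out
    simp only [List.foldl_cons]
    by_cases h1 : substr ≠ "" ∧ PySem.Str.isIn substr p = true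
    · simp only [pvBStep, pvBStep2, if_pos h1]
      exact ih vis dep out
    · by_cases h2 : PySem.Set.contains vis p = true
      · simp only [pvBStep, pvBStep2, if_neg h1, if_pos h2]
        exact ih vis dep out
      · simp only [pvBStep, pvBStep2, if_neg h1, if_neg h2]
        exact ih (vis.add p) (dep ++ [p]) (out ++ [p])

-- the pvBStep fold appends the same new suffix to depends and to the frontier
theorem pvBStep_acc (substr : String) : ∀ (L : List String)
    (vis : PySem.Set String) (dep out : List String),
    L.foldl (pvBStep substr) (vis, dep, out)
    = ((L.foldl (pvBStep substr) (vis, [], [])).1,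
       dep ++ (L.foldl (pvBStep substr) (vis, [], [])).2.2,
       out ++ (L.foldl (pvBStep substr) (vis, [], [])).2.2) := by
  intro L
  induction L with
  | nil => intro vis dep out; simp
  | cons p L ih =>
    intro vis dep out
    simp only [List.foldl_cons]
    by_cases h1 : substr ≠ "" ∧ PySem.Str.isIn substr p = true
    · simp only [pvBStep, if_pos h1]
      exact ih vis dep out
    · by_cases h2 : PySem.Set.contains vis p = true
      · simp only [pvBStep, if_neg h1, if_pos h2]
        exact ih vis dep out
      · simp only [pvBStep, if_neg h1, if_neg h2, List.nil_append]
        rw [ih (vis.add p) (dep ++ [p]) (out ++ [p]), ih (vis.add p) [p] [p]]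
        simp

-- frontier-level versions of the two lemmas above, over the big per-node fold
theorem pvFrontier_proj (rev : PySem.Dict String (List String)) (graph : List (String × List String))
    (substr : String) (hrev : ∀ c, rev.getD c ([] : List String) = pvAdj graph c) :
    ∀ (fr : List String) (vis : PySem.Set String) (dep out : List String),
    fr.foldl (fun s cur => pvBScan graph substr cur s) (vis, dep)
    = ((fr.foldl (fun st cur => (rev.getD cur []).foldl (pvBStep substr) st) (vis, dep, out)).1,
       (fr.foldl (fun st cur => (rev.getD cur []).foldl (pvBStep substr) st) (vis, dep, out)).2.1) := by
  intro fr
  induction fr with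
  | nil => intro vis dep out; rfl
  | cons cur fr ih =>
    intro vis dep out
    simp only [List.foldl_cons]
    rw [pvBScan_eq, ← hrev cur, pvBStep2_proj substr (rev.getD cur []) vis dep out]
    exact ih _ _ _
  
theorem pvFrontier_acc (rev : PySem.Dict String (List String)) (substr : String) :
    ∀ (fr : List String) (vis : PySem.Set String) (dep out : List String),
    fr.foldl (fun st cur => (rev.getD cur []).foldl (pvBStep substr) st) (vis, dep, out)
    = ((fr.foldl (fun st cur => (rev.getD cur []).foldl (pvBStep substr) st) (vis, [], [])).1,
       dep ++ (fr.foldl (fun st cur => (rev.getD cur []).foldl (pvBStep substr) st) (vis, [], [])).2.2,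
       out ++ (fr.foldl (fun st cur => (rev.getD cur []).foldl (pvBStep substr) st) (vis, [], [])).2.2) := by
  intro fr
  induction fr with
  | nil => intro vis dep out; simp
  | cons cur fr ih =>
    intro vis dep out
    simp only [List.foldl_cons]
    rw [pvBStep_acc substr (rev.getD cur []) vis dep out]
    rw [ih (List.foldl (pvBStep substr) (vis, [], []) (rev.getD cur [])).1
          (dep ++ (List.foldl (pvBStep substr) (vis, [], []) (rev.getD cur [])).2.2)
          (out ++ (List.foldl (pvBStep substr) (vis, [], []) (rev.getD cur [])).2.2)]
    rw [pvBStep_acc substr (rev.getD cur []) vis [] []]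
    rw [ih (List.foldl (pvBStep substr) (vis, [], []) (rev.getD cur [])).1
          ([] ++ (List.foldl (pvBStep substr) (vis, [], []) (rev.getD cur [])).2.2)
          ([] ++ (List.foldl (pvBStep substr) (vis, [], []) (rev.getD cur [])).2.2)]
    simp

-- B's rounds loop equals the level loop, with the frontier read off as depends[start:]
theorem pvRounds_eq (rev : PySem.Dict String (List String)) (graph : List (String × List String))
    (substr : String) (hrev : ∀ c, rev.getD c ([] : List String) = pvAdj graph c) :
    ∀ (r : Nat) (vis : PySem.Set String) (dep : List String) (start : Nat),
    start ≤ dep.length →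
    pvBRounds graph substr r start (vis, dep)
    = pvBLoop rev substr r (dep.drop start) vis dep := by
  intro r
  induction r with
  | zero => intro vis dep start _; rfl
  | succ r ih =>
    intro vis dep start hstart
    rw [pvBRounds, pvBLoop]
    by_cases he : start = dep.length
    · have hdrop : dep.drop start = [] := by
        apply List.drop_eq_nil_of_le; omega
      rw [if_pos he, hdrop]
      simp
    · have hdrop : (dep.drop start).isEmpty = false := by
        have : dep.drop start ≠ [] := by
          intro h
          have := List.drop_eq_nil_iff.mp h
          omega
        simp [this]
      rw [if_neg he, hdrop]
      simp only [Bool.false_eq_true, if_false]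
      set F := (dep.drop start).foldl
        (fun st cur => (rev.getD cur []).foldl (pvBStep substr) st) (vis, dep, ([] : List String)) with hF
      have hproj := pvFrontier_proj rev graph substr hrev (dep.drop start) vis dep []
      rw [← hF] at hproj
      rw [hproj]
      have hacc := pvFrontier_acc rev substr (dep.drop start) vis dep []
      rw [← hF] at hacc
      have hdep1 : F.2.1 = dep ++ F.2.2 := by
        rw [hacc]
        simp
      have hlen : dep.length ≤ F.2.1.length := by
        rw [hdep1]; simp
      have hdropF : F.2.1.drop dep.length = F.2.2 := by
        rw [hdep1, List.drop_append_of_le_length (le_refl _)]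
        simp
      rw [ih F.1 F.2.1 dep.length hlen, hdropF]

-- ===== VERDICT (by name: the statement is the Claim_ definition above) =====
theorem reverse_deps_spec : Claim_equal_reverse_deps := by
  intro graph target md substr _hdom
  unfold Spec_reverse_deps
  show reverse_deps graph target md substr = reverse_deps_alt graph target md substr
  unfold reverse_deps reverse_deps_alt
  by_cases hmd : md ≤ 0
  · have h1 : 1 + 2 * (graph.flatMap (fun kv => kv.2)).length
        = (2 * (graph.flatMap (fun kv => kv.2)).length) + 1 := by omega
    rw [if_pos hmd, h1]
    simp only [pvALoop, if_pos hmd, pvALoop_nil]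
  · rw [if_neg hmd]
    rw [Int.not_le] at hmd
    have hrev : ∀ c, (pvRevGraphA graph).getD c ([] : List String) = pvAdj graph c :=
      pvRevA_getD graph
    have hU : ∀ c, ∀ p ∈ (pvRevGraphA graph).getD c ([] : List String),
        p ∈ (pvEdges graph).map (fun e => e.2) := by
      intro c p hp
      rw [hrev] at hp
      rcases List.mem_map.1 hp with ⟨e, he, rfl⟩
      exact List.mem_map_of_mem (List.mem_of_mem_filter he)
    have hf : ([target].length) + ([] : List String).length
        + 2 * pvK ((pvEdges graph).map (fun e => e.2)) (PySem.Set.add PySem.Set.empty target)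
        ≤ 1 + 2 * (graph.flatMap (fun kv => kv.2)).length := by
      have hle := List.length_filter_le
        (fun x => !((PySem.Set.add PySem.Set.empty target).contains x))
        ((pvEdges graph).map (fun e => e.2))
      have hlen : ((pvEdges graph).map (fun e => e.2)).length
          = (graph.flatMap (fun kv => kv.2)).length := by
        simp [pvEdges]
      unfold pvK
      simp only [List.length_cons, List.length_nil] at *
      omega
    have hmain := pvMain (pvRevGraphA graph) md substr ((pvEdges graph).map (fun e => e.2)) hU
      ((md - 1).toNat) [target] (1 + 2 * (graph.flatMap (fun kv => kv.2)).length) []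
      (PySem.Set.add PySem.Set.empty target) [] 0 (by omega) (by omega) hf
    simp only [List.map_cons, List.map_nil, List.append_nil] at hmain
    rw [hmain]
    -- the single-node frontier [target] from (vis0, [], [])
    set F := [target].foldl
      (fun st cur => ((pvRevGraphA graph).getD cur []).foldl (pvBStep substr) st)
      ((PySem.Set.add PySem.Set.empty target), ([] : List String), ([] : List String)) with hFdef
    have hacc := pvFrontier_acc (pvRevGraphA graph) substr [target]
      (PySem.Set.add PySem.Set.empty target) [] []
    rw [← hFdef] at hacc
    have hdep : F.2.1 = F.2.2 := by rw [hacc]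
    have hscan : pvBScan graph substr target ((PySem.Set.add PySem.Set.empty target), ([] : List String))
        = (F.1, F.2.1) := by
      have := pvFrontier_proj (pvRevGraphA graph) graph substr hrev [target]
        (PySem.Set.add PySem.Set.empty target) [] []
      rw [← hFdef] at this
      simpa using this
    rw [hscan]
    have := pvRounds_eq (pvRevGraphA graph) graph substr hrev (md - 1).toNat F.1 F.2.1 0
      (Nat.zero_le _)
    rw [this, List.drop_zero, hdep]
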